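-- pv_equiv track=rewrite | github.com/diversity1/ATK-Agent | src/knowledge/field_ontology.py | infer_operator
-- ===== SOURCE A (Python) =====
-- from typing import Any, Dict, Iterable, List
--
-- def infer_operator(modifiers: Iterable[str], raw_value: Any = None, default: str = "equals") -> str:
--     modifiers = {str(mod).lower() for mod in modifiers}
--     if "contains" in modifiers:
--         return "contains"
--     if "startswith" in modifiers:
--         return "startswith"
--     if "endswith" in modifiers:
--         return "endswith"
--     if "re" in modifiers or "regex" in modifiers:
--         return "regex"
--     if "exists" in modifiers:
--         return "exists"
--     if "all" in modifiers:
--         return "contains_all"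
--
--     value = str(raw_value or "")
--     if "*" in value or "%" in value:
--         return "wildcard"
--     return default
-- ===== SOURCE B (Python) =====
-- _RANKED = {
--     "contains": (0, "contains"),
--     "startswith": (1, "startswith"),
--     "endswith": (2, "endswith"),
--     "re": (3, "regex"),
--     "regex": (3, "regex"),
--     "exists": (4, "exists"),
--     "all": (5, "contains_all"),
-- }
--
--
-- def infer_operator(modifiers, raw_value=None, default="equals"):
--     best = None
--     for mod in modifiers:
--         hit = _RANKED.get(str(mod).lower())
--         if hit is not None and (best is None or hit[0] < best[0]):
--             best = hit
--     if best is not None: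
--         return best[1]
--     value = str(raw_value or "")
--     if "*" in value or "%" in value:
--         return "wildcard"
--     return default
-- ===== Notes on version B (the rewrite author's own statement) =====
-- stated objective: alternative
-- what changed: Replaces A's build-a-set-then-fixed-chain-of-membership-tests with a single scan over modifiers that keeps the best (lowest-rank) hit from a keyword->(priority, operator) table, falling back to the wildcard/default check only when no keyword was seen.
import Mathlib
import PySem

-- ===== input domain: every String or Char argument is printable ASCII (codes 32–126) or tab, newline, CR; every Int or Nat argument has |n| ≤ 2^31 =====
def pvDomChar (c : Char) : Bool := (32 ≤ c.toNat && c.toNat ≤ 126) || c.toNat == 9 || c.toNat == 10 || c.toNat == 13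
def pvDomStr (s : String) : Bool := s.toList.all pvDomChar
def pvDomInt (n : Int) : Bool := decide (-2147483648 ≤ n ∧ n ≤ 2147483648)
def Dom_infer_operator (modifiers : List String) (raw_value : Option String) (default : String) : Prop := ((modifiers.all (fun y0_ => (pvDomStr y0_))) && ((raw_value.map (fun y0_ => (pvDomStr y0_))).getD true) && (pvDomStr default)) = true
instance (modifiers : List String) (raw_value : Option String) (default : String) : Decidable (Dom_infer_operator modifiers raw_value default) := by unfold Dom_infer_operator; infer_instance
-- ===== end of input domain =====

-- B replaces the set-then-membership-chain with a single scan keeping the lowest-rank keyword hit (alternative decomposition, same cost).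


-- ===== PORT A =====
-- str(mod).lower() on strings is PySem.Str.lower; str(raw_value or "") on Option String is .getD ""
-- (raw_value = some "" is falsy, giving "", which equals the string itself).
def infer_operator (modifiers : List String) (raw_value : Option String) (default : String) : String :=
  let mods : PySem.Set String := PySem.Set.ofList (modifiers.map (fun m => PySem.Str.lower m))
  if PySem.Set.contains mods "contains" then "contains"
  else if PySem.Set.contains mods "startswith" then "startswith"
  else if PySem.Set.contains mods "endswith" then "endswith"
  else if PySem.Set.contains mods "re" || PySem.Set.contains mods "regex" then "regex"
  else if PySem.Set.contains mods "exists" then "exists"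
  else if PySem.Set.contains mods "all" then "contains_all"
  else
    let value := raw_value.getD ""
    if PySem.Str.isIn "*" value || PySem.Str.isIn "%" value then "wildcard" else default

-- ===== PORT B =====
-- the _RANKED dict of Source B (distinct keys, insertion order)
def pvRanked : PySem.Dict String (Nat × String) :=
  ⟨[("contains", (0, "contains")), ("startswith", (1, "startswith")), ("endswith", (2, "endswith")),
    ("re", (3, "regex")), ("regex", (3, "regex")), ("exists", (4, "exists")), ("all", (5, "contains_all"))]⟩

-- one iteration of Source B's for-loop
def pvStep (best : Option (Nat × String)) (mod : String) : Option (Nat × String) :=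
  match PySem.Dict.get? pvRanked (PySem.Str.lower mod) with
  | none => best
  | some hit =>
    match best with
    | none => some hit
    | some b => if hit.1 < b.1 then some hit else best

def infer_operator_alt (modifiers : List String) (raw_value : Option String) (default : String) : String :=
  match modifiers.foldl pvStep none with
  | some b => b.2
  | none =>
    let value := raw_value.getD ""
    if PySem.Str.isIn "*" value || PySem.Str.isIn "%" value then "wildcard" else default

-- ===== PRECONDITION & SPEC =====
def Spec_infer_operator (modifiers : List String) (raw_value : Option String) (default : String) (out : String) : Prop := out = infer_operator_alt modifiers raw_value default
instance (modifiers : List String) (raw_value : Option String) (default : String) (out : String) : Decidable (Spec_infer_operator modifiers raw_value default out) := by unfold Spec_infer_operator; infer_instance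

-- ===== CLAIM (what is proved, stated in full; the proofs are below) =====
def Claim_equal_infer_operator : Prop := ∀ (modifiers : List String) (raw_value : Option String) (default : String), Dom_infer_operator modifiers raw_value default → Spec_infer_operator modifiers raw_value default (infer_operator modifiers raw_value default)

-- ===== LEMMAS AND PROOFS =====

-- the operator returned for each priority rank
def pvOpOf (r : Nat) : String :=
  if r = 0 then "contains" else if r = 1 then "startswith" else if r = 2 then "endswith"
  else if r = 3 then "regex" else if r = 4 then "exists" else "contains_all"

-- rank of an accumulator value (6 = no hit yet)
def pvRk : Option (Nat × String) → Nat
  | none => 6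
  | some h => h.1

-- invariant of the loop accumulator
def pvGood (x : Option (Nat × String)) : Prop := x = none ∨ ∃ r, r < 6 ∧ x = some (r, pvOpOf r)

-- rank of a (lowered) modifier string
def pvRank (s : String) : Nat :=
  match PySem.Dict.get? pvRanked s with
  | none => 6
  | some h => h.1

lemma get?_pvRanked (s : String) : PySem.Dict.get? pvRanked s =
    if s = "contains" then some (0, "contains") else if s = "startswith" then some (1, "startswith")
    else if s = "endswith" then some (2, "endswith") else if s = "re" then some (3, "regex")
    else if s = "regex" then some (3, "regex") else if s = "exists" then some (4, "exists")
    else if s = "all" then some (5, "contains_all") else none := by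
  simp only [pvRanked, PySem.Dict.get?, List.find?_cons, List.find?_nil]
  repeat' split
  all_goals simp_all [beq_iff_eq, beq_eq_false_iff_ne, ne_comm]

lemma pvRank_closed (s : String) : pvRank s =
    if s = "contains" then 0 else if s = "startswith" then 1 else if s = "endswith" then 2
    else if s = "re" then 3 else if s = "regex" then 3 else if s = "exists" then 4
    else if s = "all" then 5 else 6 := by
  unfold pvRank
  rw [get?_pvRanked]
  split_ifs <;> rfl

lemma pvHit_good (s : String) (h : Nat × String) (hh : PySem.Dict.get? pvRanked s = some h) :
    h.1 < 6 ∧ h.2 = pvOpOf h.1 := by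
  rw [get?_pvRanked] at hh
  split_ifs at hh <;> simp_all <;> rw [← hh] <;> decide

lemma pvStep_spec (acc : Option (Nat × String)) (mod : String) (h : pvGood acc) :
    pvGood (pvStep acc mod) ∧ pvRk (pvStep acc mod) = min (pvRk acc) (pvRank (PySem.Str.lower mod)) := by
  have hacc6 : pvRk acc ≤ 6 := by
    rcases h with rfl | ⟨r, hr, rfl⟩ <;> simp [pvRk]
    omega
  unfold pvStep
  cases hg : PySem.Dict.get? pvRanked (PySem.Str.lower mod) with
  | none =>
    simp only []
    refine ⟨h, ?_⟩
    have : pvRank (PySem.Str.lower mod) = 6 := by unfold pvRank; rw [hg]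
    omega
  | some hit =>
    obtain ⟨hlt, hop⟩ := pvHit_good _ _ hg
    have hrnk : pvRank (PySem.Str.lower mod) = hit.1 := by unfold pvRank; rw [hg]
    rcases h with rfl | ⟨r, hr, rfl⟩
    · refine ⟨Or.inr ⟨hit.1, hlt, ?_⟩, ?_⟩
      · cases hit; simp_all
      · simp [pvRk, hrnk]; omega
    · simp only [pvRk] at hacc6 ⊢
      by_cases hc : hit.1 < r
      · rw [if_pos hc]
        refine ⟨Or.inr ⟨hit.1, hlt, by cases hit; simp_all⟩, ?_⟩
        simp [hrnk]; omega
      · rw [if_neg hc]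
        refine ⟨Or.inr ⟨r, hr, rfl⟩, ?_⟩
        simp [hrnk]; omega

lemma pvFold_spec (t : List String) : ∀ (acc : Option (Nat × String)), pvGood acc →
    pvGood (t.foldl pvStep acc) ∧
    pvRk (t.foldl pvStep acc) = t.foldl (fun b m => min b (pvRank (PySem.Str.lower m))) (pvRk acc) := by
  induction t with
  | nil => intro acc h; exact ⟨h, rfl⟩
  | cons m t ih =>
    intro acc h
    obtain ⟨g, e⟩ := pvStep_spec acc m h
    simpa [List.foldl_cons, e] using ih _ g

lemma pvBrank_le_iff (t : List String) : ∀ (b r : Nat),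
    t.foldl (fun x m => min x (pvRank (PySem.Str.lower m))) b ≤ r ↔
      b ≤ r ∨ ∃ m ∈ t, pvRank (PySem.Str.lower m) ≤ r := by
  induction t with
  | nil => simp
  | cons m t ih =>
    intro b r
    simp only [List.foldl_cons, ih, min_le_iff, List.mem_cons]
    constructor
    · rintro ((h | h) | ⟨m', hm', h⟩)
      · exact Or.inl h
      · exact Or.inr ⟨m, Or.inl rfl, h⟩
      · exact Or.inr ⟨m', Or.inr hm', h⟩
    · rintro (h | ⟨m', (rfl | hm'), h⟩)
      · exact Or.inl (Or.inl h)
      · exact Or.inl (Or.inr h)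
      · exact Or.inr ⟨m', hm', h⟩

lemma pvMemA (modifiers : List String) (k : String) :
    PySem.Set.contains (PySem.Set.ofList (modifiers.map (fun m => PySem.Str.lower m))) k = true ↔
      ∃ m ∈ modifiers, PySem.Str.lower m = k := by
  simp [PySem.Set.contains, PySem.Set.mem_ofList, List.mem_map]

lemma pvRes_some (modifiers : List String) (i : Nat)
    (h : pvRk (modifiers.foldl pvStep none) = i) :
    modifiers.foldl pvStep none = some (i, pvOpOf i) ∨ (modifiers.foldl pvStep none = none ∧ i = 6) := by
  rcases (pvFold_spec modifiers none (Or.inl rfl)).1 with hn | ⟨r, hr, hs⟩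
  · rw [hn] at h; simp only [pvRk] at h; exact Or.inr ⟨hn, h.symm⟩
  · rw [hs] at h ⊢
    simp only [pvRk] at h
    rw [h] at hs ⊢
    exact Or.inl rfl

-- if no modifier lowers to a keyword of rank ≤ j, the running best has rank > j
lemma pvNoKw_lb (modifiers : List String) (j : Nat) (hj : j < 6)
    (hk : ∀ m ∈ modifiers, pvRank (PySem.Str.lower m) ≤ j → False) :
    ¬ pvRk (modifiers.foldl pvStep none) ≤ j := by
  intro hle
  rw [(pvFold_spec modifiers none (Or.inl rfl)).2] at hle
  rcases (pvBrank_le_iff modifiers (pvRk none) j).mp hle with h6 | ⟨m, hm, hr⟩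
  · simp only [pvRk] at h6; omega
  · exact hk m hm hr

-- the running best has rank at most the rank of any present keyword
lemma pvKw_ub (modifiers : List String) (m : String) (hm : m ∈ modifiers) (j : Nat)
    (hr : pvRank (PySem.Str.lower m) ≤ j) :
    pvRk (modifiers.foldl pvStep none) ≤ j := by
  rw [(pvFold_spec modifiers none (Or.inl rfl)).2]
  exact (pvBrank_le_iff modifiers (pvRk none) j).mpr (Or.inr ⟨m, hm, hr⟩)

theorem infer_operator_spec : Claim_equal_infer_operator := by
  intro modifiers raw_value default _
  unfold Spec_infer_operator infer_operator infer_operator_alt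
  simp only [Bool.or_eq_true, pvMemA]
  by_cases h0 : ∃ m ∈ modifiers, PySem.Str.lower m = "contains"
  · rw [if_pos h0]
    obtain ⟨m, hm, hk⟩ := h0
    have hub := pvKw_ub modifiers m hm 0 (by rw [hk]; decide)
    rcases pvRes_some modifiers 0 (by omega) with hr | ⟨_, h6⟩
    · rw [hr]; rfl
    · omega
  rw [if_neg h0]
  by_cases h1 : ∃ m ∈ modifiers, PySem.Str.lower m = "startswith"
  · rw [if_pos h1]
    obtain ⟨m, hm, hk⟩ := h1
    have hub := pvKw_ub modifiers m hm 1 (by rw [hk]; decide)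
    have hlb := pvNoKw_lb modifiers 0 (by omega) (by
      intro m' hm' hr'
      have hc := pvRank_closed (PySem.Str.lower m')
      split_ifs at hc with a1 a2 a3 a4 a5 a6 a7
      · exact h0 ⟨m', hm', a1⟩
      all_goals omega)
    rcases pvRes_some modifiers 1 (by omega) with hr | ⟨_, h6⟩
    · rw [hr]; rfl
    · omega
  rw [if_neg h1]
  by_cases h2 : ∃ m ∈ modifiers, PySem.Str.lower m = "endswith"
  · rw [if_pos h2]
    obtain ⟨m, hm, hk⟩ := h2
    have hub := pvKw_ub modifiers m hm 2 (by rw [hk]; decide)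
    have hlb := pvNoKw_lb modifiers 1 (by omega) (by
      intro m' hm' hr'
      have hc := pvRank_closed (PySem.Str.lower m')
      split_ifs at hc with a1 a2 a3 a4 a5 a6 a7
      · exact h0 ⟨m', hm', a1⟩
      · exact h1 ⟨m', hm', a2⟩
      all_goals omega)
    rcases pvRes_some modifiers 2 (by omega) with hr | ⟨_, h6⟩
    · rw [hr]; rfl
    · omega
  rw [if_neg h2]
  by_cases h3 : (∃ m ∈ modifiers, PySem.Str.lower m = "re") ∨ (∃ m ∈ modifiers, PySem.Str.lower m = "regex")
  · rw [if_pos h3]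
    have hub : pvRk (modifiers.foldl pvStep none) ≤ 3 := by
      rcases h3 with ⟨m, hm, hk⟩ | ⟨m, hm, hk⟩
      · exact pvKw_ub modifiers m hm 3 (by rw [hk]; decide)
      · exact pvKw_ub modifiers m hm 3 (by rw [hk]; decide)
    have hlb := pvNoKw_lb modifiers 2 (by omega) (by
      intro m' hm' hr'
      have hc := pvRank_closed (PySem.Str.lower m')
      split_ifs at hc with a1 a2 a3 a4 a5 a6 a7
      · exact h0 ⟨m', hm', a1⟩
      · exact h1 ⟨m', hm', a2⟩
      · exact h2 ⟨m', hm', a3⟩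
      all_goals omega)
    rcases pvRes_some modifiers 3 (by omega) with hr | ⟨_, h6⟩
    · rw [hr]; rfl
    · omega
  rw [if_neg h3]
  by_cases h4 : ∃ m ∈ modifiers, PySem.Str.lower m = "exists"
  · rw [if_pos h4]
    obtain ⟨m, hm, hk⟩ := h4
    have hub := pvKw_ub modifiers m hm 4 (by rw [hk]; decide)
    have hlb := pvNoKw_lb modifiers 3 (by omega) (by
      intro m' hm' hr'
      have hc := pvRank_closed (PySem.Str.lower m')
      split_ifs at hc with a1 a2 a3 a4 a5 a6 a7
      · exact h0 ⟨m', hm', a1⟩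
      · exact h1 ⟨m', hm', a2⟩
      · exact h2 ⟨m', hm', a3⟩
      · exact h3 (Or.inl ⟨m', hm', a4⟩)
      · exact h3 (Or.inr ⟨m', hm', a5⟩)
      all_goals omega)
    rcases pvRes_some modifiers 4 (by omega) with hr | ⟨_, h6⟩
    · rw [hr]; rfl
    · omega
  rw [if_neg h4]
  by_cases h5 : ∃ m ∈ modifiers, PySem.Str.lower m = "all"
  · rw [if_pos h5]
    obtain ⟨m, hm, hk⟩ := h5
    have hub := pvKw_ub modifiers m hm 5 (by rw [hk]; decide)
    have hlb := pvNoKw_lb modifiers 4 (by omega) (by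
      intro m' hm' hr'
      have hc := pvRank_closed (PySem.Str.lower m')
      split_ifs at hc with a1 a2 a3 a4 a5 a6 a7
      · exact h0 ⟨m', hm', a1⟩
      · exact h1 ⟨m', hm', a2⟩
      · exact h2 ⟨m', hm', a3⟩
      · exact h3 (Or.inl ⟨m', hm', a4⟩)
      · exact h3 (Or.inr ⟨m', hm', a5⟩)
      · exact h4 ⟨m', hm', a6⟩
      all_goals omega)
    rcases pvRes_some modifiers 5 (by omega) with hr | ⟨_, h6⟩
    · rw [hr]; rfl
    · omega
  rw [if_neg h5]
  have hlb := pvNoKw_lb modifiers 5 (by omega) (by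
    intro m' hm' hr'
    have hc := pvRank_closed (PySem.Str.lower m')
    split_ifs at hc with a1 a2 a3 a4 a5 a6 a7
    · exact h0 ⟨m', hm', a1⟩
    · exact h1 ⟨m', hm', a2⟩
    · exact h2 ⟨m', hm', a3⟩
    · exact h3 (Or.inl ⟨m', hm', a4⟩)
    · exact h3 (Or.inr ⟨m', hm', a5⟩)
    · exact h4 ⟨m', hm', a6⟩
    · exact h5 ⟨m', hm', a7⟩
    all_goals omega)
  rcases (pvFold_spec modifiers none (Or.inl rfl)).1 with hn | ⟨r, hr6, hs⟩
  · rw [hn]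
  · exfalso; apply hlb; rw [hs]; simp only [pvRk]; omega
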